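-- pv_equiv track=rewrite | github.com/yu7400ki/atcoder.jp | atcoder.jp/PyPy3 (7.3.0)/abc254/abc254_e.py | bfs
-- ===== SOURCE A (Python) =====
-- from collections import defaultdict, deque
--
-- def bfs(graph, n, limit):
--     dic = defaultdict(lambda : -1)
--     queue = deque()
--     queue.append(n)
--     dic[n] = 0
--     ans = n
--     while len(queue) != 0:
--         pos = queue.popleft()
--         for i in graph[pos]:
--             if dic[i] == -1:
--                 dic[i] = dic[pos] + 1
--                 if dic[i] <= limit:
--                     ans += i
--                     if dic[i] < limit:
--                         queue.append(i)
--     return ans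
-- ===== SOURCE B (Python) =====
-- def bfs(graph, n, limit):
--     visited = {n}
--     frontier = [n]
--     ans = n
--     for _ in range(limit):
--         if not frontier:
--             break
--         nxt = []
--         for pos in frontier:
--             for i in graph[pos]:
--                 if i not in visited:
--                     visited.add(i)
--                     nxt.append(i)
--                     ans += i
--         frontier = nxt
--     return ans
-- ===== Notes on version B (the rewrite author's own statement) =====
-- stated objective: alternative
-- what changed: Replaced the single FIFO queue with a per-node distance defaultdict by a level-synchronous BFS: a visited set and a frontier list, iterated limit times, with no distances stored at all.
import Mathlib
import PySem

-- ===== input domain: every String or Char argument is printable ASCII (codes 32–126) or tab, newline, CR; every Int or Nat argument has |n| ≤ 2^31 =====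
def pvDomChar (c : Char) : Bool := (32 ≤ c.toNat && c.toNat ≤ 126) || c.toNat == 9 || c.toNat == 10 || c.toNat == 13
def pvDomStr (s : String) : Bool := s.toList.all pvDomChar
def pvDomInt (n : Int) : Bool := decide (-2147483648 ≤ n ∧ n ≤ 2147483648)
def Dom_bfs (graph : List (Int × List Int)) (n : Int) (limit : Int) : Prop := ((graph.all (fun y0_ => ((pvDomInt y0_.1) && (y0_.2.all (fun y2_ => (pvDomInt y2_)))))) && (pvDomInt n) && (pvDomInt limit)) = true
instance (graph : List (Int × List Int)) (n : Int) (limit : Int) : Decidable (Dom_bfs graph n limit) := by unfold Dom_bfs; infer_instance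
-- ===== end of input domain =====

-- B is a level-synchronous BFS (visited set + frontier per round) instead of A's FIFO queue with a distance dict; equal return value on Pre_.

-- ===== PORT A =====
-- graph[pos]: dict lookup; inside Pre_bfs every node A looks up is a key, so the [] default is never taken (KeyError is excluded by Pre_).
def adjOf (graph : List (Int × List Int)) (pos : Int) : List Int :=
  ((PySem.Dict.mk graph).get? pos).getD []

-- body of A's inner 'for i in graph[pos]' loop; state = (queue, dic, ans).
-- dic is the defaultdict(lambda: -1): reads are getD · (-1). 'dic[i] = dic[pos] + 1' reads dic[pos] first (v), then the
-- later reads of dic[i] are exactly v (insert-then-read of the same key), so the branches test v.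
def stepA (limit : Int) (pos : Int) (st : List Int × PySem.Dict Int Int × Int) (i : Int) :
    List Int × PySem.Dict Int Int × Int :=
  if st.2.1.getD i (-1) == -1 then
    let v := st.2.1.getD pos (-1) + 1
    let d2 := st.2.1.insert i v
    if v ≤ limit then
      if v < limit then (st.1 ++ [i], d2, st.2.2 + i) else (st.1, d2, st.2.2 + i)
    else (st.1, d2, st.2.2)
  else st

-- A's 'while len(queue) != 0' loop; fuel only makes it total (each iteration pops one element; pops are bounded by
-- 1 + the number of adjacency entries, see bfs below), the computation is A's step for step.
def loopA (graph : List (Int × List Int)) (limit : Int) :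
    Nat → List Int → PySem.Dict Int Int → Int → Int
  | 0, _, _, ans => ans
  | _ + 1, [], _, ans => ans
  | f + 1, pos :: rest, dic, ans =>
      let st := (adjOf graph pos).foldl (stepA limit pos) (rest, dic, ans)
      loopA graph limit f st.1 st.2.1 st.2.2

def bfs (graph : List (Int × List Int)) (n : Int) (limit : Int) : Int :=
  loopA graph limit ((graph.flatMap (·.2)).length + 1) [n]
    ((PySem.Dict.empty : PySem.Dict Int Int).insert n 0) n

-- ===== PORT B =====
-- body of B's inner 'for i in graph[pos]' loop; state = (next_frontier, visited, ans)
def visitB (st : List Int × PySem.Set Int × Int) (i : Int) : List Int × PySem.Set Int × Int :=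
  if PySem.Set.contains st.2.1 i then st
  else (st.1 ++ [i], PySem.Set.add st.2.1 i, st.2.2 + i)

-- one frontier node of B's 'for pos in frontier' loop
def stepB (graph : List (Int × List Int)) (st : List Int × PySem.Set Int × Int) (pos : Int) :
    List Int × PySem.Set Int × Int :=
  (adjOf graph pos).foldl visitB st

-- B's 'for _ in range(limit)' loop with the early break on an empty frontier
def loopB (graph : List (Int × List Int)) :
    Nat → List Int → PySem.Set Int → Int → Int
  | 0, _, _, ans => ans
  | k + 1, frontier, vis, ans =>
      if frontier.isEmpty then ans
      else
        let st := frontier.foldl (stepB graph) ([], vis, ans)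
        loopB graph k st.1 st.2.1 st.2.2

def bfs_alt (graph : List (Int × List Int)) (n : Int) (limit : Int) : Int :=
  loopB graph limit.toNat [n] (PySem.Set.ofList [n]) n

-- ===== PRECONDITION & SPEC =====
-- neighbour list of x as the input presents it (dict lookup, [] when x is not a key); used only to state Pre_
def nbrs (graph : List (Int × List Int)) (x : Int) : List Int :=
  ((PySem.Dict.mk graph).get? x).getD []

-- the distance-k ball around n in the graph: ballGrow adds every neighbour of a member (duplicates skipped)
def ballAdd (a : List Int) (i : Int) : List Int := if i ∈ a then a else a ++ [i]
def ballGrow (graph : List (Int × List Int)) (s : List Int) : List Int :=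
  s.foldl (fun acc x => (nbrs graph x).foldl ballAdd acc) s
def ball (graph : List (Int × List Int)) (n : Int) : Nat → List Int
  | 0 => [n]
  | k + 1 => ballGrow graph (ball graph n k)

-- A raises KeyError on graph[pos] exactly when some node within distance limit-1 of n (always including n itself) is
-- not a key; Pre_ states exactly that via the distance ball of n (radius capped at graph.length, after which the ball
-- is stable), so Pre_ excludes only inputs on which A raises. B raises a KeyError on exactly those inputs too, except
-- when limit ≤ 0 with n not a key: there A raises on graph[n] while B's range(limit) loop is empty and B returns n.
def Pre_bfs (graph : List (Int × List Int)) (n : Int) (limit : Int) : Prop :=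
  ∀ x ∈ ball graph n (min (limit - 1).toNat graph.length), (PySem.Dict.mk graph).contains x = true
instance (graph : List (Int × List Int)) (n : Int) (limit : Int) : Decidable (Pre_bfs graph n limit) := by
  unfold Pre_bfs; infer_instance

def pvWitness_bfs : (List (Int × List Int)) × Int × Int := ([(0, [1]), (1, [0, 2]), (2, [1])], 0, 2)

def Spec_bfs (graph : List (Int × List Int)) (n : Int) (limit : Int) (out : Int) : Prop := out = bfs_alt graph n limit
instance (graph : List (Int × List Int)) (n : Int) (limit : Int) (out : Int) : Decidable (Spec_bfs graph n limit out) := by unfold Spec_bfs; infer_instance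

-- ===== CLAIM (what is proved, stated in full; the proofs are below) =====
def Claim_equal_bfs : Prop := ∀ (graph : List (Int × List Int)) (n : Int) (limit : Int), Dom_bfs graph n limit → Pre_bfs graph n limit → Spec_bfs graph n limit (bfs graph n limit)

-- ===== LEMMAS AND PROOFS =====

-- number of not-yet-discovered candidate nodes (used only to bound the fuel)
def fresh (graph : List (Int × List Int)) (d : PySem.Dict Int Int) : Nat :=
  (graph.flatMap (·.2)).countP (fun i => d.getD i (-1) == -1)

-- the dic ↔ visited correspondence between A's and B's states
def DVrel (d : PySem.Dict Int Int) (vis : PySem.Set Int) : Prop :=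
  ∀ i : Int, d.getD i (-1) ≠ -1 ↔ i ∈ vis

lemma get?_mk_mem (graph : List (Int × List Int)) (pos : Int) (l : List Int) :
    (PySem.Dict.mk graph).get? pos = some l → ∃ p ∈ graph, p.2 = l := by
  induction graph with
  | nil => intro h; simp [PySem.Dict.get?] at h
  | cons p rest ih =>
      intro h
      rw [PySem.Dict.get?_mk_cons] at h
      by_cases hk : p.1 == pos
      · simp [hk] at h; exact ⟨p, by simp, h⟩
      · simp [hk] at h
        obtain ⟨q, hq, hql⟩ := ih h
        exact ⟨q, by simp [hq], hql⟩

lemma adjOf_subset (graph : List (Int × List Int)) (pos : Int) :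
    ∀ i ∈ adjOf graph pos, i ∈ graph.flatMap (·.2) := by
  intro i hi
  unfold adjOf at hi
  cases h : (PySem.Dict.mk graph).get? pos with
  | none => rw [h] at hi; simp at hi
  | some l =>
      rw [h] at hi; simp at hi
      obtain ⟨p, hp, hpl⟩ := get?_mk_mem graph pos l h
      exact List.mem_flatMap.2 ⟨p, hp, by rw [hpl]; exact hi⟩

lemma countP_lt_of_flip {l : List Int} {p q : Int → Bool}
    (h : ∀ j, p j = true → q j = true) {i : Int} (hi : i ∈ l)
    (hpi : p i = false) (hqi : q i = true) : l.countP p < l.countP q := by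
  induction l with
  | nil => simp at hi
  | cons x t ih =>
      rcases List.mem_cons.1 hi with rfl | hx
      · have h1 : t.countP p ≤ t.countP q := List.countP_mono_left (fun a _ hpa => h a hpa)
        simp [hpi, hqi]; omega
      · by_cases hx2 : p x = true
        · have := ih hx
          simp [hx2, h x hx2]; omega
        · have := ih hx
          simp at hx2
          simp [hx2]
          rcases Bool.eq_false_or_eq_true (q x) with hq2 | hq2 <;> simp [hq2] <;> omega

lemma loopA_nil (graph : List (Int × List Int)) (limit : Int) (f : Nat) (d : PySem.Dict Int Int) (a : Int) :
    loopA graph limit f [] d a = a := by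
  cases f <;> rfl

lemma foldStep (graph : List (Int × List Int)) (limit pos D : Int)
    (hD0 : 0 ≤ D) (hDl : D + 1 ≤ limit) :
    ∀ (l q acc : List Int) (d : PySem.Dict Int Int) (vis : PySem.Set Int) (a : Int),
    DVrel d vis →
    d.getD pos (-1) = D →
    (∀ i ∈ l, i ∈ graph.flatMap (·.2)) →
    ∃ newl d' vis' a',
      l.foldl (stepA limit pos) (q, d, a) = (q ++ (if D + 1 < limit then newl else []), d', a') ∧
      l.foldl visitB (acc, vis, a) = (acc ++ newl, vis', a') ∧
      DVrel d' vis' ∧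
      (∀ j, d.getD j (-1) ≠ -1 → d'.getD j (-1) = d.getD j (-1)) ∧
      (∀ x ∈ newl, d'.getD x (-1) = D + 1) ∧
      fresh graph d' + newl.length ≤ fresh graph d := by
  intro l
  induction l with
  | nil =>
      intro q acc d vis a hrel hpos hsub
      exact ⟨[], d, vis, a, by simp, by simp, hrel, fun j _ => rfl, by simp, by simp⟩
  | cons i t ih =>
      intro q acc d vis a hrel hpos hsub
      have hi_mem : i ∈ graph.flatMap (·.2) := hsub i List.mem_cons_self
      by_cases hfi : d.getD i (-1) = -1
      · -- i is fresh: both sides record it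
        have hnvis : i ∉ vis := fun hv => absurd ((hrel i).2 hv) (by simp [hfi])
        have hposne : pos ≠ i := by intro h; rw [h, hfi] at hpos; omega
        have hcon : PySem.Set.contains vis i = false := by
          rw [← Bool.not_eq_true, PySem.Set.contains_iff]; exact hnvis
        have hstepA : stepA limit pos (q, d, a) i =
            ((if D + 1 < limit then q ++ [i] else q), d.insert i (D + 1), a + i) := by
          simp only [stepA, hfi, hpos]
          simp only [beq_self_eq_true, if_true, if_pos hDl]
          split <;> rfl
        have hstepB : visitB (acc, vis, a) i = (acc ++ [i], PySem.Set.add vis i, a + i) := by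
          simp [visitB, hnvis]
        have hd2i : (d.insert i (D + 1)).getD i (-1) = D + 1 := by
          rw [PySem.Dict.getD_insert]; simp
        have hd2ne : ∀ j, j ≠ i → (d.insert i (D + 1)).getD j (-1) = d.getD j (-1) := by
          intro j hj; rw [PySem.Dict.getD_insert]; simp [hj]
        have hrel2 : DVrel (d.insert i (D + 1)) (PySem.Set.add vis i) := by
          intro j
          by_cases hj : j = i
          · subst hj; rw [hd2i]; simp [PySem.Set.mem_add]; omega
          · rw [hd2ne j hj, PySem.Set.mem_add]
            constructor
            · intro h; exact Or.inl ((hrel j).1 h)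
            · rintro (h | h)
              · exact (hrel j).2 h
              · exact absurd h hj
        have hpos2 : (d.insert i (D + 1)).getD pos (-1) = D := by rw [hd2ne pos hposne]; exact hpos
        have hfr2 : fresh graph (d.insert i (D + 1)) + 1 ≤ fresh graph d := by
          refine Nat.succ_le_of_lt (countP_lt_of_flip ?_ hi_mem ?_ ?_)
          · intro j hj
            by_cases hji : j = i
            · subst hji; rw [hd2i] at hj; simp at hj; omega
            · rw [hd2ne j hji] at hj; exact hj
          · rw [hd2i]; simp; omega
          · simp [hfi]
        obtain ⟨newl, d', vis', a', hA, hB, hrel', hpres', hdep', hfr'⟩ :=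
          ih (if D + 1 < limit then q ++ [i] else q) (acc ++ [i]) (d.insert i (D + 1))
            (PySem.Set.add vis i) (a + i) hrel2 hpos2 (fun j hj => hsub j (List.mem_cons_of_mem _ hj))
        refine ⟨i :: newl, d', vis', a', ?_, ?_, hrel', ?_, ?_, ?_⟩
        · rw [List.foldl_cons, hstepA, hA]
          by_cases hlt : D + 1 < limit <;> simp [hlt]
        · rw [List.foldl_cons, hstepB, hB]; simp
        · intro j hj
          have hji : j ≠ i := fun h => by rw [h, hfi] at hj; simp at hj
          rw [hpres' j (by rw [hd2ne j hji]; exact hj), hd2ne j hji]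
        · intro x hx
          rcases List.mem_cons.1 hx with rfl | hx'
          · rw [hpres' x (by rw [hd2i]; omega), hd2i]
          · exact hdep' x hx'
        · simp only [List.length_cons]; omega
      · -- i already seen: both sides skip it
        have hvis : i ∈ vis := (hrel i).1 hfi
        have hcon : PySem.Set.contains vis i = true := (PySem.Set.contains_iff vis i).2 hvis
        have hstepA : stepA limit pos (q, d, a) i = (q, d, a) := by
          simp [stepA, hfi]
        have hstepB : visitB (acc, vis, a) i = (acc, vis, a) := by
          simp [visitB, hvis]
        obtain ⟨newl, d', vis', a', hA, hB, hrel', hpres', hdep', hfr'⟩ :=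
          ih q acc d vis a hrel hpos (fun j hj => hsub j (List.mem_cons_of_mem _ hj))
        exact ⟨newl, d', vis', a', by rw [List.foldl_cons, hstepA]; exact hA,
          by rw [List.foldl_cons, hstepB]; exact hB, hrel', hpres', hdep', hfr'⟩

lemma levelStep (graph : List (Int × List Int)) (limit D : Int)
    (hD0 : 0 ≤ D) (hDl : D + 1 ≤ limit) :
    ∀ (P Q : List Int) (d : PySem.Dict Int Int) (vis : PySem.Set Int) (a : Int),
    DVrel d vis →
    (∀ x ∈ P, d.getD x (-1) = D) →
    (∀ x ∈ Q, d.getD x (-1) = D + 1) →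
    ∃ d',
      (∀ f : Nat, loopA graph limit (f + P.length) (P ++ (if D + 1 < limit then Q else [])) d a
         = loopA graph limit f (if D + 1 < limit then (P.foldl (stepB graph) (Q, vis, a)).1 else []) d'
             (P.foldl (stepB graph) (Q, vis, a)).2.2) ∧
      DVrel d' (P.foldl (stepB graph) (Q, vis, a)).2.1 ∧
      (∀ x ∈ (P.foldl (stepB graph) (Q, vis, a)).1, d'.getD x (-1) = D + 1) ∧
      fresh graph d' + (P.foldl (stepB graph) (Q, vis, a)).1.length ≤ fresh graph d + Q.length := by
  intro P
  induction P with
  | nil =>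
      intro Q d vis a hrel hP hQ
      exact ⟨d, fun f => by simp, hrel, hQ, by simp⟩
  | cons pos P' ih =>
      intro Q d vis a hrel hP hQ
      have hposD : d.getD pos (-1) = D := hP pos List.mem_cons_self
      obtain ⟨newl, d1, vis1, a1, hA, hB, hrel1, hpres1, hdep1, hfr1⟩ :=
        foldStep graph limit pos D hD0 hDl (adjOf graph pos)
          (P' ++ (if D + 1 < limit then Q else [])) Q d vis a hrel hposD (adjOf_subset graph pos)
      have hstepB : stepB graph (Q, vis, a) pos = (Q ++ newl, vis1, a1) := hB
      have hfoldB : (pos :: P').foldl (stepB graph) (Q, vis, a)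
          = P'.foldl (stepB graph) (Q ++ newl, vis1, a1) := by
        rw [List.foldl_cons, hstepB]
      obtain ⟨d', hloop, hrel', hdep', hfr'⟩ :=
        ih (Q ++ newl) d1 vis1 a1 hrel1
          (fun x hx => by
            rw [hpres1 x (by rw [hP x (List.mem_cons_of_mem _ hx)]; omega)]
            exact hP x (List.mem_cons_of_mem _ hx))
          (fun x hx => by
            rcases List.mem_append.1 hx with hx' | hx'
            · rw [hpres1 x (by rw [hQ x hx']; omega)]; exact hQ x hx'
            · exact hdep1 x hx')
      refine ⟨d', ?_, by rw [hfoldB]; exact hrel', by rw [hfoldB]; exact hdep', ?_⟩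
      · intro f
        have hfuel : f + (pos :: P').length = (f + P'.length) + 1 := by simp; omega
        rw [hfuel, List.cons_append]
        show loopA graph limit ((f + P'.length) + 1)
            (pos :: (P' ++ (if D + 1 < limit then Q else []))) d a = _
        rw [loopA, hA]
        have hq : (P' ++ (if D + 1 < limit then Q else [])) ++ (if D + 1 < limit then newl else [])
            = P' ++ (if D + 1 < limit then Q ++ newl else []) := by
          by_cases hlt : D + 1 < limit <;> simp [hlt]
        rw [hq, hfoldB]
        exact hloop f
      · rw [hfoldB]
        have := hfr'
        simp only [List.length_append] at this ⊢
        omega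

lemma mainEq (graph : List (Int × List Int)) (limit : Int) :
    ∀ (r : Nat) (P : List Int) (d : PySem.Dict Int Int) (vis : PySem.Set Int) (a : Int) (f : Nat),
    1 ≤ r → DVrel d vis →
    (∀ x ∈ P, d.getD x (-1) = limit - r) →
    0 ≤ limit - (r : Int) →
    P.length + fresh graph d ≤ f →
    loopA graph limit f P d a = loopB graph r P vis a := by
  intro r
  induction r with
  | zero => intro P d vis a f h1; omega
  | succ r' ih =>
      intro P d vis a f _ hrel hdep hD hf
      by_cases hP : P = []
      · subst hP; rw [loopA_nil]; simp [loopB]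
      · have hcast : ((r' + 1 : Nat) : Int) = (r' : Int) + 1 := by push_cast; ring
        have hD0 : (0 : Int) ≤ limit - (r' : Int) - 1 := by rw [hcast] at hD; omega
        have hDl : (limit - (r' : Int) - 1) + 1 ≤ limit := by
          have : (0 : Int) ≤ (r' : Int) := Int.natCast_nonneg r'
          omega
        obtain ⟨d', hloop, hrel', hdep', hfr'⟩ :=
          levelStep graph limit (limit - (r' : Int) - 1) hD0 hDl P [] d vis a hrel
            (fun x hx => by rw [hdep x hx, hcast]; ring) (by simp)
        have hflen : P.length ≤ f := by omega
        have hmain := hloop (f - P.length)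
        rw [Nat.sub_add_cancel hflen] at hmain
        have hite : P ++ (if (limit - (r' : Int) - 1) + 1 < limit then ([] : List Int) else []) = P := by
          simp
        rw [hite] at hmain
        have hB : loopB graph (r' + 1) P vis a
            = loopB graph r' (P.foldl (stepB graph) ([], vis, a)).1
                (P.foldl (stepB graph) ([], vis, a)).2.1 (P.foldl (stepB graph) ([], vis, a)).2.2 := by
          rw [loopB]
          simp [List.isEmpty_eq_false_iff.2 hP]
        rw [hmain, hB]
        by_cases hr0 : r' = 0
        · subst hr0
          have hlt : ¬ (limit - ((0 : Nat) : Int) - 1) + 1 < limit := by simp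
          rw [if_neg hlt, loopA_nil]
          rfl
        · have hr1 : 1 ≤ r' := Nat.one_le_iff_ne_zero.2 hr0
          have hlt : (limit - (r' : Int) - 1) + 1 < limit := by
            have : (1 : Int) ≤ (r' : Int) := by exact_mod_cast hr1
            omega
          rw [if_pos hlt]
          refine ih _ d' _ _ (f - P.length) hr1 hrel'
            (fun x hx => by rw [hdep' x hx]; ring) (by omega)
            (by simp only [List.length_nil, Nat.add_zero] at hfr'; omega)

lemma zeroFold (limit pos : Int) (hlim : limit ≤ 0) :
    ∀ (l q : List Int) (d : PySem.Dict Int Int) (a : Int),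
    d.getD pos (-1) = 0 →
    ∃ d', l.foldl (stepA limit pos) (q, d, a) = (q, d', a) := by
  intro l
  induction l with
  | nil => intro q d a _; exact ⟨d, rfl⟩
  | cons i t ih =>
      intro q d a hpos
      by_cases hfi : d.getD i (-1) = -1
      · have hposne : pos ≠ i := by intro h; rw [h, hfi] at hpos; omega
        have hstep : stepA limit pos (q, d, a) i = (q, d.insert i 1, a) := by
          simp only [stepA, hfi, hpos]
          simp; omega
        have hpos2 : (d.insert i 1).getD pos (-1) = 0 := by
          rw [PySem.Dict.getD_insert]; simp [hposne]; exact hpos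
        obtain ⟨d', hd'⟩ := ih q (d.insert i 1) a hpos2
        exact ⟨d', by rw [List.foldl_cons, hstep]; exact hd'⟩
      · have hstep : stepA limit pos (q, d, a) i = (q, d, a) := by simp [stepA, hfi]
        obtain ⟨d', hd'⟩ := ih q d a hpos
        exact ⟨d', by rw [List.foldl_cons, hstep]; exact hd'⟩

-- ===== VERDICT (by name: the statement is the Claim_ definition above) =====
theorem bfs_spec : Claim_equal_bfs := by
  intro graph n limit _ _
  unfold Spec_bfs bfs bfs_alt
  have hdic : ((PySem.Dict.empty : PySem.Dict Int Int).insert n 0).getD n (-1) = 0 := by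
    rw [PySem.Dict.getD_insert]; simp
  by_cases hlim : limit ≤ 0
  · have htn : limit.toNat = 0 := by omega
    rw [htn]
    obtain ⟨d', hd'⟩ := zeroFold limit n hlim (adjOf graph n) []
      ((PySem.Dict.empty : PySem.Dict Int Int).insert n 0) n hdic
    rw [loopA, hd']
    rw [loopA_nil]
    rfl
  · rw [not_le] at hlim
    have hr1 : 1 ≤ limit.toNat := by omega
    have hc : ((limit.toNat : Nat) : Int) = limit := Int.toNat_of_nonneg (by omega)
    refine mainEq graph limit limit.toNat [n]
      ((PySem.Dict.empty : PySem.Dict Int Int).insert n 0) (PySem.Set.ofList [n]) n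
      ((graph.flatMap (·.2)).length + 1) hr1 ?_ ?_ ?_ ?_
    · intro i
      rw [PySem.Dict.getD_insert]
      by_cases hi : i = n
      · simp [hi, PySem.Set.mem_ofList]
      · simp [hi, PySem.Set.mem_ofList, PySem.Dict.getD_empty]
    · intro x hx
      rcases List.mem_singleton.1 hx with rfl
      rw [hdic, hc]; ring
    · rw [hc]; omega
    · have := List.countP_le_length (l := graph.flatMap (·.2)) (p := fun i => ((PySem.Dict.empty : PySem.Dict Int Int).insert n 0).getD i (-1) == -1)
      unfold fresh
      simp at this ⊢
      omega
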